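-- pv_equiv track=rewrite | github.com/algoldst/Mia_Python_Practice | strings.py | identify_genetic_palindrome
-- ===== SOURCE A (Python) =====
-- def identify_genetic_palindrome(gene_seq):
--     reverse = gene_seq[::-1]
--     # Convert letters to A-T C-G complements
--     rev_pal = ''
--     for letter in reverse:
--         if letter == 'A':
--             rev_pal += 'T'
--         elif letter == 'T':
--             rev_pal += 'A'
--         elif letter == 'C':
--             rev_pal += 'G'
--         elif letter == 'G':
--             rev_pal += 'C'
--
--     if rev_pal == gene_seq:
--         return gene_seq + " is a palindrome"
--     else:
--         return gene_seq + " is NOT a palindrome"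
--     return rev_pal
-- ===== SOURCE B (Python) =====
-- def identify_genetic_palindrome(gene_seq):
--     complement = {'A': 'T', 'T': 'A', 'C': 'G', 'G': 'C'}
--     n = len(gene_seq)
--     for i in range(n):
--         if complement.get(gene_seq[n - 1 - i]) != gene_seq[i]:
--             return gene_seq + " is NOT a palindrome"
--     return gene_seq + " is a palindrome"
-- ===== Notes on version B (the rewrite author's own statement) =====
-- stated objective: faster
-- what changed: Replaces building the complemented reversed string (repeated += concatenation, then a whole-string comparison) with a single two-pointer index loop comparing complement.get(gene_seq[n-1-i]) with gene_seq[i], returning on the first mismatch; no intermediate string is constructed.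
import Mathlib
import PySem

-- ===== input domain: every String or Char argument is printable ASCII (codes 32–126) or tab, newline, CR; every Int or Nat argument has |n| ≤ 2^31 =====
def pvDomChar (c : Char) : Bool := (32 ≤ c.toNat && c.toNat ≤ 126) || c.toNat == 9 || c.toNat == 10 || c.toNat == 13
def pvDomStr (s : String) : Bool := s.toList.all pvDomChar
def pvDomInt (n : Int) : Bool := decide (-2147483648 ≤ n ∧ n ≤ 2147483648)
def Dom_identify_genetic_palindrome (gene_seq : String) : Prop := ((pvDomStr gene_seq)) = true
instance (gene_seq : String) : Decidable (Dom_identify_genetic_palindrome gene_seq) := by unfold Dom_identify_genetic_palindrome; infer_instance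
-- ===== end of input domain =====

-- B replaces A's construction of the complemented reversed string with a single
-- two-pointer index loop that returns on the first mismatch and builds no intermediate string (measured faster in a timing run).


-- ===== PORT A =====
-- gene_seq[::-1] is List.reverse (PySem.List.slice?_none_none_neg_one); the loop's
-- 'rev_pal += <letter>' is foldl over the reversed characters appending one char.
def identify_genetic_palindrome (gene_seq : String) : String :=
  let reverse := gene_seq.toList.reverse
  let rev_pal := reverse.foldl (fun acc letter =>
    if letter = 'A' then acc ++ ['T']
    else if letter = 'T' then acc ++ ['A']
    else if letter = 'C' then acc ++ ['G']
    else if letter = 'G' then acc ++ ['C']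
    else acc) []
  if rev_pal = gene_seq.toList then
    String.ofList (gene_seq.toList ++ " is a palindrome".toList)
  else
    String.ofList (gene_seq.toList ++ " is NOT a palindrome".toList)

-- ===== PORT B =====
def pvComp : PySem.Dict Char Char :=
  PySem.Dict.ofList [('A', 'T'), ('T', 'A'), ('C', 'G'), ('G', 'C')]

-- 'for i in range(n): if complement.get(seq[n-1-i]) != seq[i]: return NOT' as a
-- recursion on i; complement.get = Dict.get? (none = Python None, never equal to a char).
def pvAltLoop (l : List Char) (n i : Nat) : Bool :=
  if _h : i < n then
    if (PySem.List.pyGet? l ((n : Int) - 1 - (i : Int))).bind pvComp.get?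
         ≠ PySem.List.pyGet? l (i : Int) then false
    else pvAltLoop l n (i + 1)
  else true
termination_by n - i

def identify_genetic_palindrome_alt (gene_seq : String) : String :=
  let l := gene_seq.toList
  if pvAltLoop l l.length 0 then
    String.ofList (l ++ " is a palindrome".toList)
  else
    String.ofList (l ++ " is NOT a palindrome".toList)

-- ===== PRECONDITION & SPEC =====
def Spec_identify_genetic_palindrome (gene_seq : String) (out : String) : Prop := out = identify_genetic_palindrome_alt gene_seq
instance (gene_seq : String) (out : String) : Decidable (Spec_identify_genetic_palindrome gene_seq out) := by unfold Spec_identify_genetic_palindrome; infer_instance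

-- ===== CLAIM (what is proved, stated in full; the proofs are below) =====
def Claim_equal_identify_genetic_palindrome : Prop := ∀ (gene_seq : String), Dom_identify_genetic_palindrome gene_seq → Spec_identify_genetic_palindrome gene_seq (identify_genetic_palindrome gene_seq)

-- ===== LEMMAS AND PROOFS =====

theorem pvCompEq : pvComp = PySem.Dict.mk [('A', 'T'), ('T', 'A'), ('C', 'G'), ('G', 'C')] := by
  decide

-- A's per-letter step appends exactly what pvComp.get? yields.
theorem pv_step_eq (acc : List Char) (c : Char) :
    (if c = 'A' then acc ++ ['T']
     else if c = 'T' then acc ++ ['A']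
     else if c = 'C' then acc ++ ['G']
     else if c = 'G' then acc ++ ['C']
     else acc) = acc ++ (pvComp.get? c).toList := by
  split_ifs with h1 h2 h3 h4
  · subst h1; simp [pvCompEq, PySem.Dict.get?_mk_cons]
  · subst h2; simp [pvCompEq, PySem.Dict.get?_mk_cons]
  · subst h3; simp [pvCompEq, PySem.Dict.get?_mk_cons]
  · subst h4; simp [pvCompEq, PySem.Dict.get?_mk_cons]
  · simp [pvCompEq, PySem.Dict.get?, beq_iff_eq,
      Ne.symm h1, Ne.symm h2, Ne.symm h3, Ne.symm h4]

theorem pv_foldl_toList (f : Char → Option Char) (l acc : List Char) :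
    l.foldl (fun a c => a ++ (f c).toList) acc = acc ++ l.filterMap f := by
  induction l generalizing acc with
  | nil => simp
  | cons c t ih =>
    rw [List.foldl_cons, ih, List.filterMap_cons]
    cases h : f c <;> simp

-- A's foldl builds reverse.filterMap pvComp.get?.
theorem pv_foldl_eq (l acc : List Char) :
    l.foldl (fun acc letter =>
      if letter = 'A' then acc ++ ['T']
      else if letter = 'T' then acc ++ ['A']
      else if letter = 'C' then acc ++ ['G']
      else if letter = 'G' then acc ++ ['C']
      else acc) acc = acc ++ l.filterMap pvComp.get? := by
  simp only [pv_step_eq]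
  exact pv_foldl_toList pvComp.get? l acc

theorem pv_fm_elim (f : Char → Option Char) (xs ys : List Char)
    (hfm : xs.filterMap f = ys) (hlen : xs.length = ys.length) :
    ∀ j (hj : j < xs.length) (hj' : j < ys.length), f xs[j] = some ys[j] := by
  induction xs generalizing ys with
  | nil => intro j hj hj'; simp at hj
  | cons x t ih =>
    intro j hj hj'
    cases hx : f x with
    | none =>
      exfalso
      simp only [List.filterMap_cons, hx] at hfm
      have := List.length_filterMap_le f t
      rw [hfm] at this
      simp at hlen
      omega
    | some b =>
      simp only [List.filterMap_cons, hx] at hfm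
      cases ys with
      | nil => simp at hfm
      | cons y ys' =>
        rw [List.cons.injEq] at hfm
        obtain ⟨rfl, hfm'⟩ := hfm
        cases j with
        | zero => simpa using hx
        | succ k =>
          simp only [List.getElem_cons_succ]
          exact ih ys' hfm' (by simpa using hlen) k (by simpa using hj) (by simpa using hj')

theorem pv_fm_intro (f : Char → Option Char) (xs ys : List Char)
    (hlen : xs.length = ys.length)
    (h : ∀ j (hj : j < xs.length) (hj' : j < ys.length), f xs[j] = some ys[j]) :
    xs.filterMap f = ys := by
  induction xs generalizing ys with
  | nil => cases ys <;> simp_all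
  | cons x t ih =>
    cases ys with
    | nil => simp at hlen
    | cons y ys' =>
      have h0 := h 0 (by simp) (by simp)
      simp only [List.getElem_cons_zero] at h0
      simp only [List.filterMap_cons, h0, List.cons.injEq, true_and]
      apply ih ys' (by simpa using hlen)
      intro j hj hj'
      simpa using h (j + 1) (by simpa using hj) (by simpa using hj')

-- Characterisation of B's loop.
theorem pv_altLoop_iff (l : List Char) (i : Nat) :
    pvAltLoop l l.length i = true ↔
      ∀ j, i ≤ j → (hj : j < l.length) →
        pvComp.get? (l[l.length - 1 - j]'(by omega)) = some l[j] := by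
  generalize hk : l.length - i = k
  induction k generalizing i with
  | zero =>
    rw [pvAltLoop, dif_neg (by omega : ¬ i < l.length)]
    exact ⟨fun _ j hij hj => absurd hj (by omega), fun _ => rfl⟩
  | succ k ih =>
    have hi : i < l.length := by omega
    rw [pvAltLoop, dif_pos hi]
    have hidx : ((l.length : Int) - 1 - (i : Int)) = ((l.length - 1 - i : Nat) : Int) := by
      omega
    have h1 : PySem.List.pyGet? l ((l.length : Int) - 1 - (i : Int))
        = some (l[l.length - 1 - i]'(by omega)) := by
      rw [hidx, PySem.List.pyGet?_natCast, List.getElem?_eq_getElem (by omega)]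
    have h2 : PySem.List.pyGet? l (i : Int) = some l[i] := by
      rw [PySem.List.pyGet?_natCast, List.getElem?_eq_getElem hi]
    rw [h1, h2]
    simp only [Option.bind_some]
    by_cases hc : pvComp.get? (l[l.length - 1 - i]'(by omega)) = some l[i]
    · rw [if_neg (not_not_intro hc), ih (i + 1) (by omega)]
      constructor
      · intro h j hij hj
        rcases Nat.eq_or_lt_of_le hij with rfl | hlt
        · exact hc
        · exact h j hlt hj
      · intro h j hij hj
        exact h j (by omega) hj
    · rw [if_pos hc]
      constructor
      · intro h; exact (Bool.false_ne_true h).elim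
      · intro h; exact absurd (h i le_rfl hi) hc

-- ===== VERDICT (by name: the statement is the Claim_ definition above) =====
theorem identify_genetic_palindrome_spec : Claim_equal_identify_genetic_palindrome := by
  intro s _
  unfold Spec_identify_genetic_palindrome identify_genetic_palindrome identify_genetic_palindrome_alt
  simp only []
  rw [pv_foldl_eq, List.nil_append]
  have hcond : (s.toList.reverse.filterMap pvComp.get? = s.toList) ↔
      (pvAltLoop s.toList s.toList.length 0 = true) := by
    rw [pv_altLoop_iff]
    constructor
    · intro hA j _ hj
      have := pv_fm_elim pvComp.get? s.toList.reverse s.toList hA (by simp) j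
        (by simpa using hj) hj
      rwa [List.getElem_reverse] at this
    · intro h
      apply pv_fm_intro pvComp.get? s.toList.reverse s.toList (by simp)
      intro j hj hj'
      rw [List.getElem_reverse]
      exact h j (Nat.zero_le _) hj'
  by_cases hb : pvAltLoop s.toList s.toList.length 0 = true
  · rw [if_pos (hcond.mpr hb), if_pos hb]
  · rw [if_neg (fun h => hb (hcond.mp h)), if_neg hb]
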